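-- pv_equiv track=rewrite | github.com/logsdon-lab/Snakemake-HumAS-SD | workflow/scripts/stv_multiarray.py | stv_namer
-- ===== SOURCE A (Python) =====
-- def stv_namer(live_stv_name, mons_numbers, strand):
--     if strand == "+":
--         stv_name = mons_numbers[0]
--         if mons_numbers[0].isdigit():
--             i_prev = mons_numbers[0]
--         elif (
--             "/" in mons_numbers[0] and "S" not in mons_numbers[0]
--         ):  # first mon is hybrid
--             i_prev = 25
--         else:  # 8&12 in chr18
--             i_prev = 25
--         status = "Closed"
--         for i in mons_numbers[1:]:
--             if i.isdigit():
--                 if int(i) == int(i_prev) + 1: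
--                     i_prev = i
--                     status = "ToBeClosed"
--                 else:
--                     if status == "ToBeClosed":
--                         stv_name += "-{}_{}".format(i_prev, i)
--                     else:
--                         stv_name += "_{}".format(i)
--                     i_prev = i
--                     status = "Closed"
--             # hybrid like '4/7'
--             elif "/" in i and "S" not in i:
--                 if status == "ToBeClosed":
--                     stv_name += "-{}_{}".format(i_prev, i)
--                 else:
--                     stv_name += "_{}".format(i)
--                 i_prev = 25
--                 status = "Closed"
--             # 8&12 in chr18
--             else:
--                 if status == "ToBeClosed":
--                     stv_name += "-{}_{}".format(i_prev, i)
--                 else: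
--                     stv_name += "_{}".format(i)
--                 status = "Closed"
--                 i_prev = "20"
--         if status == "ToBeClosed":
--             stv_name += "-{}".format(i)
--     # reversed. strand == '-'
--     else:
--         i_prev = 25
--         stv_name = mons_numbers[0]
--         if mons_numbers[0].isdigit():
--             i_prev = mons_numbers[0]
--         elif (
--             "/" in mons_numbers[0] and "S" not in mons_numbers[0]
--         ):  # first mon is hybrid
--             i_prev = 25
--         status = "Closed"
--         for i in mons_numbers[1:]:
--             if i.isdigit():
--                 if int(i) == int(i_prev) - 1:
--                     i_prev = i
--                     status = "ToBeClosed"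
--                 else:
--                     if status == "ToBeClosed":
--                         stv_name += "-{}_{}".format(i_prev, i)
--                     else:
--                         stv_name += "_{}".format(i)
--                     i_prev = i
--                     status = "Closed"
--             # hybrid like '4/7'
--             elif "/" in i and "S" not in i:
--                 if status == "ToBeClosed":
--                     stv_name += "-{}_{}".format(i_prev, i)
--                 else:
--                     stv_name += "_{}".format(i)
--                 i_prev = 25
--                 status = "Closed"
--             else:
--                 if status == "ToBeClosed":
--                     stv_name += "-{}_{}".format(i_prev, i)
--                 else:
--                     stv_name += "_{}".format(i)
--                 status = "Closed"
--                 i_prev = "20"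
--         if status == "ToBeClosed":
--             stv_name += "-{}".format(i)
--     stv_name = "{}.{}".format(live_stv_name, stv_name)
--     return stv_name
-- ===== SOURCE B (Python) =====
-- def stv_namer(live_stv_name, mons_numbers, strand):
--     # Staged, stateless pipeline: (1) compute a base value for every token by a
--     # local rule, (2) zip adjacent tokens into boolean "link" flags (token j+1
--     # continues a run iff it is a digit equal to base(token j) +/- 1), then
--     # (3) render with one-token lookahead: a linked token closes its run with
--     # "-tok" exactly when it is the last token or the next flag is False.
--     step = 1 if strand == "+" else -1
--
--     def base(tok, first):
--         if tok.isdigit():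
--             return int(tok)
--         if first or ("/" in tok and "S" not in tok):
--             return 25
--         return 20
--
--     bases = [base(mons_numbers[0], True)] + [base(t, False) for t in mons_numbers[1:-1]]
--     links = [t.isdigit() and int(t) == b + step for b, t in zip(bases, mons_numbers[1:])]
--
--     entries = list(zip(mons_numbers[1:], links))
--     parts = [mons_numbers[0]]
--     for j, (t, l) in enumerate(entries):
--         if l:
--             if j == len(entries) - 1 or not entries[j + 1][1]:
--                 parts.append("-" + t)
--         else:
--             parts.append("_" + t)
--     return "{}.{}".format(live_stv_name, "".join(parts))
-- ===== Notes on version B (the rewrite author's own statement) =====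
-- stated objective: alternative
-- what changed: B replaces A's single stateful accumulator loop (i_prev/status sentinels mutated while appending to the name) with a staged stateless pipeline: a per-token base list computed by a local rule, boolean link flags obtained by zipping adjacent tokens, and a final render pass that closes runs by one-entry lookahead instead of carrying run state.
import Mathlib
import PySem

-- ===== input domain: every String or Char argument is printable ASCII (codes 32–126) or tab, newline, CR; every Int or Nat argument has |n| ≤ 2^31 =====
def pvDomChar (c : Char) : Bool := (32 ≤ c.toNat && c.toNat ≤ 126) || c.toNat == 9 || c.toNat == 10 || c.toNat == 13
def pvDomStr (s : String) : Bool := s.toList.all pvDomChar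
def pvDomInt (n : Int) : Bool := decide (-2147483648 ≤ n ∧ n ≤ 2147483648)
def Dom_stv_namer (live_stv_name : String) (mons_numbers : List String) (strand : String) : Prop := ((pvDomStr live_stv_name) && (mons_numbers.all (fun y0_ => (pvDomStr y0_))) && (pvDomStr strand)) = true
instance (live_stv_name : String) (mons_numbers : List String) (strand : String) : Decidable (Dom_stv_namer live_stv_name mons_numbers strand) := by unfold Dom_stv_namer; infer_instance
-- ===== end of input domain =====

-- B replaces A's stateful accumulator machine by a staged pipeline: local per-token bases,
-- pairwise link flags from zipping adjacent tokens, then a lookahead render (objective: alternative).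

-- ===== PORT A =====
-- int(s); A only applies it where it parses (digit tokens, 25, "20")
def pvIntOf (s : String) : Int := (PySem.Int.ofStr? s).getD 0
-- A's i_prev holds either the int 25 or a string; its two Python uses:
def pvIPrevVal : Sum Int String → Int
  | .inl n => n
  | .inr s => pvIntOf s
def pvIPrevStr : Sum Int String → String
  | .inl n => PySem.Int.toStr n
  | .inr s => s
-- '"/" in i and "S" not in i'
def pvIsHyb (i : String) : Bool := PySem.Str.isIn "/" i && !(PySem.Str.isIn "S" i)

-- A's loop body; Python's '+' and '-' loop bodies are textually identical up to the
-- step sign (+1 / -1), so they are ported once with that sign as `stp`.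
-- State = (stv_name, i_prev, status == "ToBeClosed", loop variable i).
def aBody (stp : Int) (st : String × Sum Int String × Bool × String) (i : String) :
    String × Sum Int String × Bool × String :=
  let stv := st.1
  let ip := st.2.1
  let status := st.2.2.1
  if PySem.Str.strIsdigit i then
    if pvIntOf i = pvIPrevVal ip + stp then (stv, Sum.inr i, true, i)
    else ((if status then stv ++ "-" ++ pvIPrevStr ip ++ "_" ++ i else stv ++ "_" ++ i),
          Sum.inr i, false, i)
  else if pvIsHyb i then
    ((if status then stv ++ "-" ++ pvIPrevStr ip ++ "_" ++ i else stv ++ "_" ++ i),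
     Sum.inl 25, false, i)
  else
    ((if status then stv ++ "-" ++ pvIPrevStr ip ++ "_" ++ i else stv ++ "_" ++ i),
     Sum.inr "20", false, i)

def stv_namer (live_stv_name : String) (mons_numbers : List String) (strand : String) : String :=
  match mons_numbers with
  | [] => ""   -- Python raises IndexError at mons_numbers[0]; excluded by Pre_
  | m0 :: rest =>
    if strand == "+" then
      -- i_prev init: digit → the token; hybrid → 25; else → 25
      let ip0 : Sum Int String := if PySem.Str.strIsdigit m0 then Sum.inr m0 else Sum.inl 25
      let st := rest.foldl (aBody 1) (m0, ip0, false, "")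
      let stv := if st.2.2.1 then st.1 ++ "-" ++ st.2.2.2 else st.1
      live_stv_name ++ "." ++ stv
    else
      let ip0 : Sum Int String := if PySem.Str.strIsdigit m0 then Sum.inr m0 else Sum.inl 25
      let st := rest.foldl (aBody (-1)) (m0, ip0, false, "")
      let stv := if st.2.2.1 then st.1 ++ "-" ++ st.2.2.2 else st.1
      live_stv_name ++ "." ++ stv

-- ===== PORT B =====
-- Source B's base(tok, first)
def bBase (tok : String) (first : Bool) : Int :=
  if PySem.Str.strIsdigit tok then pvIntOf tok
  else if first || pvIsHyb tok then 25 else 20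

-- Source B's render loop over entries = zip(mons[1:], links), with one-entry lookahead
def bParts : List (String × Bool) → List String
  | [] => []
  | (t, l) :: xs =>
    (if l then
       (match xs with
        | [] => ["-" ++ t]
        | (_, l2) :: _ => if l2 then [] else ["-" ++ t])
     else ["_" ++ t]) ++ bParts xs

def stv_namer_alt (live_stv_name : String) (mons_numbers : List String) (strand : String) : String :=
  match mons_numbers with
  | [] => ""   -- Python raises IndexError at mons_numbers[0]; excluded by Pre_
  | m0 :: rest =>
    let stp : Int := if strand == "+" then 1 else -1
    let bases : List Int := bBase m0 true :: (rest.dropLast.map (fun t => bBase t false))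
    let links : List Bool :=
      (bases.zip rest).map (fun p => PySem.Str.strIsdigit p.2 && (pvIntOf p.2 == p.1 + stp))
    let parts : List String := m0 :: bParts (rest.zip links)
    live_stv_name ++ "." ++ String.join parts

-- ===== PRECONDITION & SPEC =====
-- Pre_ excludes only the empty token list, on which Python A raises IndexError.
def Pre_stv_namer (live_stv_name : String) (mons_numbers : List String) (strand : String) : Prop :=
  mons_numbers ≠ []
instance (live_stv_name : String) (mons_numbers : List String) (strand : String) : Decidable (Pre_stv_namer live_stv_name mons_numbers strand) := by unfold Pre_stv_namer; infer_instance
def pvWitness_stv_namer : String × List String × String := ("x", ["1", "2"], "+")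

def Spec_stv_namer (live_stv_name : String) (mons_numbers : List String) (strand : String) (out : String) : Prop := out = stv_namer_alt live_stv_name mons_numbers strand
instance (live_stv_name : String) (mons_numbers : List String) (strand : String) (out : String) : Decidable (Spec_stv_namer live_stv_name mons_numbers strand out) := by unfold Spec_stv_namer; infer_instance

-- ===== CLAIM (what is proved, stated in full; the proofs are below) =====
def Claim_equal_stv_namer : Prop := ∀ (live_stv_name : String) (mons_numbers : List String) (strand : String), Dom_stv_namer live_stv_name mons_numbers strand → Pre_stv_namer live_stv_name mons_numbers strand → Spec_stv_namer live_stv_name mons_numbers strand (stv_namer live_stv_name mons_numbers strand)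

-- ===== LEMMAS AND PROOFS =====

-- the link flag between a token and the current base, and the base a token leaves behind
def linkB (stp b : Int) (t : String) : Bool :=
  PySem.Str.strIsdigit t && (pvIntOf t == b + stp)
def nb (t : String) : Int := bBase t false

-- the zipped (token, link) stream B's render consumes, in direct-recursion form
def zl (stp : Int) (b : Int) : List String → List (String × Bool)
  | [] => []
  | t :: ts => (t, linkB stp b t) :: zl stp (nb t) ts

-- the common rendering both sides produce for the remaining tokens
def pf (stp : Int) (s : Bool) (last : String) (b : Int) : List String → String
  | [] => if s then "-" ++ last else ""
  | t :: ts =>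
    if linkB stp b t then pf stp true t (nb t) ts
    else (if s then "-" ++ last else "") ++ "_" ++ t ++ pf stp false t (nb t) ts

def finalA (st : String × Sum Int String × Bool × String) : String :=
  if st.2.2.1 then st.1 ++ "-" ++ st.2.2.2 else st.1

lemma nb_of_digit (t : String) (h : PySem.Chars.strIsdigit t.toList = true) : nb t = pvIntOf t := by
  simp [nb, bBase, PySem.Str.strIsdigit, h]

lemma pvIntOf_twenty : pvIntOf "20" = 20 := by decide

lemma A_loop (stp : Int) (rest : List String) :
    ∀ (stv : String) (ip : Sum Int String) (s : Bool) (last : String),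
      (s = true → pvIPrevStr ip = last) →
      finalA (rest.foldl (aBody stp) (stv, ip, s, last)) =
        stv ++ pf stp s last (pvIPrevVal ip) rest := by
  induction rest with
  | nil =>
      intro stv ip s last _
      cases s <;> simp [finalA, pf, String.append_assoc]
  | cons t ts ih =>
      intro stv ip s last hinv
      simp only [List.foldl]
      by_cases hd : PySem.Chars.strIsdigit t.toList = true
      · by_cases heq : pvIntOf t = pvIPrevVal ip + stp
        · rw [show aBody stp (stv, ip, s, last) t = (stv, Sum.inr t, true, t) from by
            simp [aBody, hd, heq]]
          rw [ih stv (Sum.inr t) true t (fun _ => rfl)]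
          simp [pf, linkB, hd, heq, pvIPrevVal, nb_of_digit t hd]
        · rw [show aBody stp (stv, ip, s, last) t
              = ((if s then stv ++ "-" ++ pvIPrevStr ip ++ "_" ++ t else stv ++ "_" ++ t),
                 Sum.inr t, false, t) from by simp [aBody, hd, heq]]
          rw [ih _ (Sum.inr t) false t (by simp)]
          cases s with
          | false =>
              simp [pf, linkB, hd, pvIPrevVal, nb_of_digit t hd, String.append_assoc]
              exact fun h => absurd h heq
          | true =>
              rw [hinv rfl]
              simp [pf, linkB, hd, pvIPrevVal, nb_of_digit t hd, String.append_assoc]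
              exact fun h => absurd h heq
      · have hbody : aBody stp (stv, ip, s, last) t
            = ((if s then stv ++ "-" ++ pvIPrevStr ip ++ "_" ++ t else stv ++ "_" ++ t),
               (if pvIsHyb t then Sum.inl 25 else Sum.inr "20"), false, t) := by
          by_cases hy : pvIsHyb t = true <;> simp [aBody, hd, hy]
        rw [hbody]
        by_cases hy : pvIsHyb t = true
        · rw [if_pos hy, ih _ (Sum.inl 25) false t (by simp)]
          cases s with
          | false => simp [pf, linkB, hd, pvIPrevVal, nb, bBase, hy, String.append_assoc]
          | true =>
              rw [hinv rfl]
              simp [pf, linkB, hd, pvIPrevVal, nb, bBase, hy, String.append_assoc]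
        · rw [if_neg hy, ih _ (Sum.inr "20") false t (by simp)]
          cases s with
          | false =>
              simp [pf, linkB, hd, pvIPrevVal, nb, bBase, hy, pvIntOf_twenty,
                String.append_assoc]
          | true =>
              rw [hinv rfl]
              simp [pf, linkB, hd, pvIPrevVal, nb, bBase, hy, pvIntOf_twenty,
                String.append_assoc]

lemma str_foldl_append (l : List String) :
    ∀ a : String, l.foldl (fun r s => r ++ s) a = a ++ String.join l := by
  induction l with
  | nil => intro a; show a = a ++ String.join []; simp [String.join]
  | cons h t ih =>
      intro a
      have h2 : String.join (h :: t) = ("" ++ h) ++ String.join t := by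
        show List.foldl (fun r s => r ++ s) "" (h :: t) = _
        simp only [List.foldl]
        exact ih ("" ++ h)
      show List.foldl (fun r s => r ++ s) (a ++ h) t = _
      rw [ih (a ++ h), h2]
      simp [String.append_assoc]

lemma join_cons (a : String) (l : List String) :
    String.join (a :: l) = a ++ String.join l := by
  show List.foldl (fun r s => r ++ s) "" (a :: l) = _
  simp only [List.foldl]
  rw [str_foldl_append]
  simp

lemma join_nil : String.join ([] : List String) = "" := rfl

lemma pf_false_last (stp b : Int) (last : String) (l : List String) :
    pf stp false last b l = pf stp false "" b l := by
  cases l <;> rfl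

lemma B_loop (stp : Int) (rest : List String) :
    ∀ b : Int,
      (String.join (bParts (zl stp b rest)) = pf stp false "" b rest) ∧
      (∀ last : String,
        (match rest with
         | [] => "-" ++ last
         | t :: _ => if linkB stp b t then "" else "-" ++ last)
          ++ String.join (bParts (zl stp b rest)) = pf stp true last b rest) := by
  induction rest with
  | nil => intro b; refine ⟨by simp [zl, bParts, pf, join_nil], fun last => by
      simp [zl, bParts, pf, join_nil]⟩
  | cons t ts ih =>
      intro b
      by_cases hl : linkB stp b t = true
      · have core : String.join (bParts (zl stp b (t :: ts))) = pf stp true t (nb t) ts := by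
          rw [← (ih (nb t)).2 t]
          cases ts with
          | nil => simp [zl, bParts, hl, join_cons, join_nil]
          | cons u us =>
              by_cases hl2 : linkB stp (nb t) u = true <;>
                simp [zl, bParts, hl, hl2, join_cons, String.append_assoc]
        constructor
        · rw [core]; simp [pf, hl]
        · intro last
          simp only [hl, if_true]
          rw [core]; simp [pf, hl]
      · have core : String.join (bParts (zl stp b (t :: ts)))
            = "_" ++ t ++ pf stp false "" (nb t) ts := by
          rw [← (ih (nb t)).1]
          simp [zl, bParts, hl, join_cons, String.append_assoc]
        constructor
        · rw [core]; simp [pf, hl, pf_false_last, String.append_assoc]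
        · intro last
          simp only [hl, if_false, Bool.false_eq_true]
          rw [core]; simp [pf, hl, pf_false_last, String.append_assoc]

lemma zip_links (stp : Int) (rest : List String) :
    ∀ b : Int,
      rest.zip (((b :: (rest.dropLast.map (fun t => bBase t false))).zip rest).map
        (fun p => PySem.Str.strIsdigit p.2 && (pvIntOf p.2 == p.1 + stp)))
        = zl stp b rest := by
  induction rest with
  | nil => intro b; simp [zl]
  | cons t ts ih =>
      intro b
      cases ts with
      | nil => simp [zl, linkB]
      | cons u us =>
          have := ih (nb t)
          simp only [List.dropLast, List.map, List.zip_cons_cons] at this ⊢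
          simp [zl, linkB, nb] at this ⊢
          exact this

theorem stv_namer_spec : Claim_equal_stv_namer := by
  intro live mons strand _hdom hpre
  unfold Spec_stv_namer
  match mons with
  | [] => exact absurd rfl hpre
  | m0 :: rest =>
    have key : ∀ stp : Int,
        finalA (rest.foldl (aBody stp)
          (m0, (if PySem.Str.strIsdigit m0 then Sum.inr m0 else Sum.inl 25), false, "")) =
        m0 ++ String.join (bParts (rest.zip
          (((bBase m0 true :: (rest.dropLast.map (fun t => bBase t false))).zip rest).map
            (fun p => PySem.Str.strIsdigit p.2 && (pvIntOf p.2 == p.1 + stp))))) := by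
      intro stp
      rw [zip_links, (B_loop stp rest _).1,
        A_loop stp rest m0 _ false "" (by simp)]
      congr 2
      by_cases h : PySem.Chars.strIsdigit m0.toList = true <;> simp [h, pvIPrevVal, bBase]
    by_cases hs : strand == "+"
    · simp only [stv_namer, stv_namer_alt, hs, if_pos]
      rw [join_cons]
      have k := key 1
      simp only [finalA] at k
      rw [k]
    · simp only [stv_namer, stv_namer_alt, hs, if_neg, Bool.false_eq_true, not_false_iff]
      rw [join_cons]
      have k := key (-1)
      simp only [finalA] at k
      rw [k]
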